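-- pv_equiv track=rewrite | github.com/ryan2414/CodeIt_Python | exercise_mask_number.py | mask_security_number
-- ===== SOURCE A (Python) =====
-- def mask_security_number(security_number):
--     # 코드를 입력하세요.
--     len_security_number = len(security_number)
--     masked_securty_number = ""
--     for index in range(len_security_number):
--         num = security_number[index]
--         if index >= len_security_number - 4:
--             num = '*'
--         masked_securty_number += num
--
--     return masked_securty_number
-- ===== SOURCE B (Python) =====
-- def mask_security_number(security_number):
--     n = len(security_number)
--     return security_number[:max(n - 4, 0)] + '*' * min(n, 4)
-- ===== Notes on version B (the rewrite author's own statement) =====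
-- stated objective: simpler
-- what changed: Replaces the per-index loop with quadratic string concatenation by a closed-form slice of the unmasked prefix plus a repeated-asterisk suffix of length min(len,4).
import Mathlib
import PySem

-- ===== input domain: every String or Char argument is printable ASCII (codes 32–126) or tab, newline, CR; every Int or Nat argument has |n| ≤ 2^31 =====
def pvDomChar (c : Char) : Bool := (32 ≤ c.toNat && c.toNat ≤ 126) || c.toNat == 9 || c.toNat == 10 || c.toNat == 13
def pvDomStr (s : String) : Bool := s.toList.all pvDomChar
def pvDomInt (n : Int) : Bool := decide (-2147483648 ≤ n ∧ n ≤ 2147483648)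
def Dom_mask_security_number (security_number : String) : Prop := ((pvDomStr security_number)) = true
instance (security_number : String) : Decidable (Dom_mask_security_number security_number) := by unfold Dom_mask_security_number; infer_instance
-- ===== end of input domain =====

-- B replaces A's index loop with repeated concatenation by a closed-form slice + '*' repetition (simpler).

-- ===== PORT A =====
-- loop over range(len), pick the char, overwrite with '*' in the last 4 positions, append to the accumulator
def mask_security_number (security_number : String) : String :=
  let l := security_number.toList
  let len_security_number : Int := PySem.Str.len security_number
  String.mk ((PySem.List.pyRange 0 len_security_number 1).foldl
    (fun acc index =>
      let num := PySem.List.pyGetD l index ' '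
      let num := if index ≥ len_security_number - 4 then '*' else num
      acc ++ [num]) [])

-- ===== PORT B =====
-- security_number[:max(n-4,0)] + '*' * min(n,4)
def mask_security_number_alt (security_number : String) : String :=
  let l := security_number.toList
  String.mk (l.take (l.length - 4) ++ List.replicate (min l.length 4) '*')

-- ===== PRECONDITION & SPEC =====
def Spec_mask_security_number (security_number : String) (out : String) : Prop := out = mask_security_number_alt security_number
instance (security_number : String) (out : String) : Decidable (Spec_mask_security_number security_number out) := by unfold Spec_mask_security_number; infer_instance

-- ===== CLAIM (what is proved, stated in full; the proofs are below) =====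
def Claim_equal_mask_security_number : Prop := ∀ (security_number : String), Dom_mask_security_number security_number → Spec_mask_security_number security_number (mask_security_number security_number)

-- ===== LEMMAS AND PROOFS =====

theorem mask_lists_eq (l : List Char) :
    (List.range l.length).map
      (fun (k : Nat) => if (k : Int) ≥ (l.length : Int) - 4 then '*' else l.getD k ' ')
    = l.take (l.length - 4) ++ List.replicate (min l.length 4) '*' := by
  apply List.ext_getElem
  · simp
  · intro k hk1 hk2
    simp only [List.getElem_map, List.getElem_range]
    simp only [List.length_map, List.length_range] at hk1
    by_cases h : k < l.length - 4
    · rw [if_neg (by omega)]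
      rw [List.getElem_append_left (by simpa using h), List.getElem_take]
      simp [List.getD, hk1]
    · rw [if_pos (by omega)]
      rw [List.getElem_append_right (by simpa using h)]
      simp

-- ===== VERDICT (by name: the statement is the Claim_ definition above) =====
theorem mask_security_number_spec : Claim_equal_mask_security_number := by
  intro s _
  show mask_security_number s = mask_security_number_alt s
  unfold mask_security_number mask_security_number_alt
  dsimp only
  rw [PySem.List.foldl_append_singleton_eq_map]
  congr 1
  rw [← mask_lists_eq s.toList]
  rw [show PySem.Str.len s = ((s.toList.length : Int)) from by simp, PySem.List.pyRange_one,
    List.map_map]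
  apply List.map_congr_left
  intro k hk
  simp at hk ⊢
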